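-- pv_equiv track=rewrite | github.com/fipl-hse/2020-2-level-labs | lab_3/decorators.py | has_none
-- ===== SOURCE A (Python) =====
-- def has_none(arg):
--     flattened = []
--     to_check = [*arg]
--     while to_check:
--         for value in to_check[:]:
--             if isinstance(value, str):
--                 flattened.append(value)
--             else:
--                 try:
--                     to_check.extend([*value])
--                 except TypeError:
--                     if value is None:
--                         return True
--
--                     flattened.append(value)
--             to_check.remove(value)
--
--     return False
-- ===== SOURCE B (Python) =====
-- def has_none(arg):
--     return None in arg
-- ===== Notes on version B (the rewrite author's own statement) =====
-- stated objective: simpler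
-- what changed: Replace the while/for machinery with snapshot copies and quadratic list.remove by a single membership test 'None in arg' (the argument is a flat list of optional ints).
import Mathlib
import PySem

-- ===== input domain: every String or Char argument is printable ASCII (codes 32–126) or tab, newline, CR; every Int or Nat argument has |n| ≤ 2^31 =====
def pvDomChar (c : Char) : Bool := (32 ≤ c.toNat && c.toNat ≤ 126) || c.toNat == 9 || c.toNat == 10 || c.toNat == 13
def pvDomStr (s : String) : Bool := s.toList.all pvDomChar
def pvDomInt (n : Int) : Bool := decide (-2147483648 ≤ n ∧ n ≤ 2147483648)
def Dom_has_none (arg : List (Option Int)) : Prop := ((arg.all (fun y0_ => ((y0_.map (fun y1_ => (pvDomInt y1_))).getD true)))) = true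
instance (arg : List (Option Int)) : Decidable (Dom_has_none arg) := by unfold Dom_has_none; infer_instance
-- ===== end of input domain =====

-- B replaces A's while/for machinery (copy, try/extend, quadratic list.remove) by a single membership test; return value only.

-- ===== PORT A =====
-- Inner 'for value in to_check[:]' loop: first argument is the snapshot being iterated,
-- second is the live to_check list. Elements are Option Int, so 'isinstance(value, str)'
-- is always False and '[*value]' always raises TypeError; 'value is None' → return True
-- (.inl true), otherwise flattened.append (flattened never influences the result, so it
-- is not carried). 'to_check.remove(value)' = PySem.List.remove?; the value is always
-- present (Python never raises ValueError here), so .getD keeps the list on the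
-- unreachable none branch.
def hnInner : List (Option Int) → List (Option Int) → Bool ⊕ List (Option Int)
  | [], tc => .inr tc
  | v :: rest, tc =>
    if v = none then .inl true
    else hnInner rest ((PySem.List.remove? tc v).getD tc)

-- Invariant of the inner loop when the snapshot is an initial copy of to_check:
-- either a None was found, or everything got removed.
theorem hnInner_self_aux (snap : List (Option Int)) : ∀ rest : List (Option Int),
    (none ∈ snap ∧ hnInner snap (snap ++ rest) = .inl true) ∨
    (none ∉ snap ∧ hnInner snap (snap ++ rest) = .inr rest) := by
  induction snap with
  | nil => intro rest; exact Or.inr ⟨by simp, rfl⟩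
  | cons v s ih =>
    intro rest
    by_cases hv : v = none
    · subst hv; exact Or.inl ⟨by simp, by simp [hnInner]⟩
    · rcases ih rest with ⟨h1, h2⟩ | ⟨h1, h2⟩
      · exact Or.inl ⟨by simp [h1], by simp [hnInner, hv, h2]⟩
      · refine Or.inr ⟨?_, by simp [hnInner, hv, h2]⟩
        simp [h1]; exact fun h => hv h.symm

theorem hnInner_self (tc : List (Option Int)) :
    (none ∈ tc ∧ hnInner tc tc = .inl true) ∨ (none ∉ tc ∧ hnInner tc tc = .inr []) := by
  simpa using hnInner_self_aux tc []

-- The 'while to_check:' loop.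
def hnWhile (tc : List (Option Int)) : Bool :=
  match tc with
  | [] => false
  | v :: t =>
    match h : hnInner (v :: t) (v :: t) with
    | .inl b => b
    | .inr tc' => hnWhile tc'
termination_by tc.length
decreasing_by
  rcases hnInner_self (v :: t) with ⟨_, h2⟩ | ⟨_, h2⟩ <;>
    rw [h] at h2 <;> simp_all

def has_none (arg : List (Option Int)) : Bool := hnWhile arg

-- ===== PORT B =====
-- 'return None in arg'
def has_none_alt (arg : List (Option Int)) : Bool := arg.contains none

-- ===== PRECONDITION & SPEC =====
def Spec_has_none (arg : List (Option Int)) (out : Bool) : Prop := out = has_none_alt arg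
instance (arg : List (Option Int)) (out : Bool) : Decidable (Spec_has_none arg out) := by unfold Spec_has_none; infer_instance

-- ===== CLAIM (what is proved, stated in full; the proofs are below) =====
def Claim_equal_has_none : Prop := ∀ (arg : List (Option Int)), Dom_has_none arg → Spec_has_none arg (has_none arg)

-- ===== LEMMAS AND PROOFS =====
theorem hnWhile_eq_contains (tc : List (Option Int)) : hnWhile tc = tc.contains none := by
  cases tc with
  | nil => simp [hnWhile]
  | cons v t =>
    rcases hnInner_self (v :: t) with ⟨h1, h2⟩ | ⟨h1, h2⟩
    · rw [hnWhile, h2]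
      simpa using List.mem_cons.mp h1
    · rw [hnWhile, h2]
      simp at h1
      simp [hnWhile, h1.1, h1.2]

-- ===== VERDICT (by name: the statement is the Claim_ definition above) =====
theorem has_none_spec : Claim_equal_has_none := by
  intro arg _
  unfold Spec_has_none has_none has_none_alt
  exact hnWhile_eq_contains arg
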